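-- pv_equiv track=rewrite | github.com/Boialex/Python | request_language.py | get_request_languages
-- ===== SOURCE A (Python) =====
-- def get_word_language(word, languages):
--     count = dict()
--     default = set()
--     default.add('')
--     for ch in word:
--         lang = languages.get(ch, default)
--         for l in lang:
--             get = count.get(l, 0)
--             count[l] = get + 1
--     sort_cnt = sorted(count.items(), key=lambda x: (-x[1], x[0]))
--     if sort_cnt[0][0] == '' and len(sort_cnt) > 1:
--         return sort_cnt[1][0]
--     return sort_cnt[0][0]
--
-- def get_request_languages(s, languages):
--     words = s.split()
--     has_languages = set()
--     for word in words:
--         new_lang = get_word_language(word, languages)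
--         if new_lang != '':
--             has_languages.add(new_lang)
--     if '' in has_languages and len(has_languages) == 1:
--         return ''
--     else:
--         return ' '.join(sorted(has_languages))
-- ===== SOURCE B (Python) =====
-- def get_request_languages(s, languages):
--     found = set()
--     for word in s.split():
--         count = {}
--         for ch in word:
--             for l in languages.get(ch, {''}):
--                 count[l] = count.get(l, 0) + 1
--         best = None
--         for name, c in count.items():
--             if name and (best is None or (-c, name) < best):
--                 best = (-c, name)
--         if best is not None:
--             found.add(best[1])
--     return ' '.join(sorted(found))
-- ===== Notes on version B (the rewrite author's own statement) =====
-- stated objective: simpler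
-- what changed: B drops the per-word sort of the count dict: instead of sorting items by (-count, name) and picking the first or second entry, it takes the minimum of the non-'' entries under the same (-count, name) order in one linear scan (which also removes the dead '' branch and the helper's skip rule), collecting the winners into a set as A does.
import Mathlib
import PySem

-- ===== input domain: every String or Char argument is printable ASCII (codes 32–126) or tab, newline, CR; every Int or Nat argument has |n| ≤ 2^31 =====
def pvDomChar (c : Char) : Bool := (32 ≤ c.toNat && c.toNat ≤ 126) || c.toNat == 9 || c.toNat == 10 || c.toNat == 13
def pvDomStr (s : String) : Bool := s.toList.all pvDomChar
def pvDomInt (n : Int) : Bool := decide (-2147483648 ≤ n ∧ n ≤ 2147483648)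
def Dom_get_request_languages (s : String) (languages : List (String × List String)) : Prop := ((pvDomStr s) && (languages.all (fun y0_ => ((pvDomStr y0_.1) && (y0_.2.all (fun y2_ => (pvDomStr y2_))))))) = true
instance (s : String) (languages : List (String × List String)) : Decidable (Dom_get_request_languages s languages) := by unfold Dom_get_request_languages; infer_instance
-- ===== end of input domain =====

-- B replaces A's per-word sort of the count dict (+ first/second indexing and the dead '' branch)
-- by a single linear minimum scan over the non-'' count entries; same return value wherever A returns.

-- ===== PORT A =====
-- Both Pythons build the per-word character→language count dict by the same nested loop; shared helper.
def pvCharCounts (word : List Char) (languages : List (String × List String)) : PySem.Dict String Int :=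
  word.foldl
    (fun count ch =>
      ((PySem.Dict.mk languages).getD (String.ofList [ch]) (PySem.Set.add PySem.Set.empty "")).foldl
        (fun count l => count.insert l (count.getD l 0 + 1)) count)
    PySem.Dict.empty

def get_word_language (word : List Char) (languages : List (String × List String)) : String :=
  let sort_cnt := PySem.List.sorted2 (pvCharCounts word languages).items (fun x => -x.2) (fun x => x.1)
  match sort_cnt with
  | [] => ""            -- Python raises IndexError here (empty count dict); excluded by Pre_
  | [x] => x.1
  | x :: y :: _ => if x.1 = "" then y.1 else x.1

def pvStepA (languages : List (String × List String)) (hs : PySem.Set String) (word : String) : PySem.Set String :=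
  let new_lang := get_word_language word.toList languages
  if new_lang ≠ "" then PySem.Set.add hs new_lang else hs

def get_request_languages (s : String) (languages : List (String × List String)) : String :=
  let has_languages := (PySem.Str.split₀ s).foldl (pvStepA languages) PySem.Set.empty
  if "" ∈ has_languages ∧ has_languages.length = 1 then ""
  else PySem.Str.join " " (PySem.List.sorted has_languages (fun x => x))

-- ===== PORT B =====
-- 'if name and (best is None or (-c, name) < best): best = (-c, name)'  (tuple < is lexicographic)
def pvBestStep (best : Option (Int × String)) (p : String × Int) : Option (Int × String) :=
  match best with
  | none => if p.1 ≠ "" then some (-p.2, p.1) else none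
  | some b => if p.1 ≠ "" ∧ (-p.2 < b.1 ∨ (-p.2 = b.1 ∧ p.1 < b.2)) then some (-p.2, p.1) else some b

def pvWordBest (word : List Char) (languages : List (String × List String)) : Option (Int × String) :=
  (pvCharCounts word languages).items.foldl pvBestStep none

def pvStepB (languages : List (String × List String)) (found : PySem.Set String) (word : String) : PySem.Set String :=
  match pvWordBest word.toList languages with
  | some b => PySem.Set.add found b.2
  | none => found

def get_request_languages_alt (s : String) (languages : List (String × List String)) : String :=
  PySem.Str.join " "
    (PySem.List.sorted ((PySem.Str.split₀ s).foldl (pvStepB languages) PySem.Set.empty) (fun x => x))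

-- ===== PRECONDITION & SPEC =====
-- Pre_ excludes exactly the inputs where Python A raises IndexError: a word all of whose characters
-- are mapped by `languages` (first-match lookup) to an EMPTY language set (then the word's count dict
-- is empty and sort_cnt[0] raises).
-- pvLangsOf: the language set `languages.get(ch, {''})` of one character (closed-form lookup on the input).
def pvLangsOf (languages : List (String × List String)) (ch : Char) : List String :=
  match languages.find? (fun kv => kv.1.toList == [ch]) with
  | some kv => kv.2
  | none => [""]

def Pre_get_request_languages (s : String) (languages : List (String × List String)) : Prop :=
  ((PySem.Chars.split₀ s.toList).all (fun word =>
    word.any (fun ch => !(pvLangsOf languages ch == [])))) = true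
instance (s : String) (languages : List (String × List String)) : Decidable (Pre_get_request_languages s languages) := by unfold Pre_get_request_languages; infer_instance

def pvWitness_get_request_languages : String × (List (String × List String)) :=
  ("ab ba", [("a", ["en", "ru"]), ("b", ["en"])])

def Spec_get_request_languages (s : String) (languages : List (String × List String)) (out : String) : Prop := out = get_request_languages_alt s languages
instance (s : String) (languages : List (String × List String)) (out : String) : Decidable (Spec_get_request_languages s languages out) := by unfold Spec_get_request_languages; infer_instance

-- ===== CLAIM (what is proved, stated in full; the proofs are below) =====
def Claim_equal_get_request_languages : Prop := ∀ (s : String) (languages : List (String × List String)), Dom_get_request_languages s languages → Pre_get_request_languages s languages → Spec_get_request_languages s languages (get_request_languages s languages)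

-- ===== LEMMAS AND PROOFS =====

-- Python's tuple order on (-count, name) pairs, via the lexicographic order on Int × String.
def pvLE (a b : Int × String) : Prop := toLex a ≤ toLex b
def pvKey (p : String × Int) : Lex (Int × String) := toLex (-p.2, p.1)

lemma pvLE_antisymm {a b : Int × String} (h1 : pvLE a b) (h2 : pvLE b a) : a = b :=
  congrArg (fun x : Lex (Int × String) => (ofLex x : Int × String)) (le_antisymm h1 h2)

lemma pvLE_of_lt {a b : Int × String} (h : a.1 < b.1 ∨ (a.1 = b.1 ∧ a.2 < b.2)) : pvLE a b := by
  unfold pvLE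
  rw [Prod.Lex.le_iff]
  rcases h with h | ⟨h1, h2⟩
  · exact Or.inl h
  · exact Or.inr ⟨h1, le_of_lt h2⟩

lemma pvLE_of_not_lt {a b : Int × String} (h : ¬ (a.1 < b.1 ∨ (a.1 = b.1 ∧ a.2 < b.2))) : pvLE b a := by
  unfold pvLE
  rw [Prod.Lex.le_iff]
  rcases lt_trichotomy (b.1 : Int) a.1 with hl | he | hg
  · exact Or.inl hl
  · refine Or.inr ⟨he, ?_⟩
    by_contra hx
    exact h (Or.inr ⟨he.symm, lt_of_not_ge hx⟩)
  · exact absurd (Or.inl hg) h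

-- what B's linear scan computes: a minimal non-'' entry under the (-count, name) order
lemma pvBestStep_fold_spec (l : List (String × Int)) (acc : Option (Int × String)) :
    match l.foldl pvBestStep acc with
    | none => acc = none ∧ ∀ p ∈ l, p.1 = ""
    | some b => (acc = some b ∨ ∃ p ∈ l, p.1 ≠ "" ∧ b = (-p.2, p.1)) ∧
        (∀ q ∈ l, q.1 ≠ "" → pvLE b (-q.2, q.1)) ∧
        (∀ a, acc = some a → pvLE b a) := by
  induction l generalizing acc with
  | nil =>
    cases acc with
    | none => exact ⟨rfl, by simp⟩
    | some b => exact ⟨Or.inl rfl, by simp, fun a ha => by cases ha; exact le_refl _⟩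
  | cons p t ih =>
    simp only [List.foldl_cons]
    have H := ih (pvBestStep acc p)
    cases hres : t.foldl pvBestStep (pvBestStep acc p) with
    | none =>
      rw [hres] at H
      obtain ⟨h1, h2⟩ := H
      refine ⟨?_, fun q hq => ?_⟩
      · cases acc with
        | none => rfl
        | some b => simp only [pvBestStep] at h1; split at h1 <;> simp at h1
      · rcases List.mem_cons.mp hq with rfl | hq'
        · cases acc with
          | none =>
            simp only [pvBestStep] at h1
            by_cases hp : q.1 = ""
            · exact hp
            · simp [hp] at h1
          | some b => simp only [pvBestStep] at h1; split at h1 <;> simp at h1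
        · exact h2 q hq'
    | some b =>
      rw [hres] at H
      obtain ⟨h1, h2, h3⟩ := H
      refine ⟨?_, ?_, ?_⟩
      · rcases h1 with h1 | ⟨q, hq, hqe, rfl⟩
        · cases acc with
          | none =>
            simp only [pvBestStep] at h1
            by_cases hp : p.1 = ""
            · simp [hp] at h1
            · simp only [hp, ne_eq, not_false_iff, if_true] at h1
              exact Or.inr ⟨p, List.mem_cons_self, hp, by cases h1; rfl⟩
          | some a =>
            simp only [pvBestStep] at h1
            split at h1
            · rename_i hc
              exact Or.inr ⟨p, List.mem_cons_self, hc.1, by cases h1; rfl⟩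
            · exact Or.inl (by cases h1; rfl)
        · exact Or.inr ⟨q, List.mem_cons_of_mem _ hq, hqe, rfl⟩
      · intro q hq hqne
        rcases List.mem_cons.mp hq with rfl | hq'
        · cases acc with
          | none =>
            simp only [pvBestStep, hqne, ne_eq, not_false_iff, if_true] at h3
            exact h3 _ rfl
          | some a =>
            simp only [pvBestStep] at h3
            split at h3
            · exact h3 _ rfl
            · rename_i hc
              have hna : ¬ (-q.2 < a.1 ∨ (-q.2 = a.1 ∧ q.1 < a.2)) := fun hlt => hc ⟨hqne, hlt⟩
              have hle : pvLE a (-q.2, q.1) := pvLE_of_not_lt (a := (-q.2, q.1)) (b := a) hna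
              exact le_trans (h3 a rfl) hle
        · exact h2 q hq' hqne
      · intro a ha
        cases ha
        simp only [pvBestStep] at h3
        split at h3
        · rename_i hc
          exact le_trans (h3 _ rfl) (pvLE_of_lt hc.2)
        · exact h3 _ rfl

lemma pvKey_lt_iff (a b : String × Int) :
    pvKey a < pvKey b ↔ (-a.2 < -b.2 ∨ (-a.2 = -b.2 ∧ a.1 < b.1)) := by
  simp only [pvKey, Prod.Lex.lt_iff, ofLex_toLex]

-- A's sorted2 with keys (-x.2, x.1) is sorted with the single lexicographic key pvKey
lemma pvSorted2_eq (xs : List (String × Int)) :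
    PySem.List.sorted2 xs (fun x => -x.2) (fun x => x.1) =
      PySem.List.sorted xs pvKey := by
  have hb : (fun (a b : String × Int) =>
        (decide ((-a.2 : Int) < -b.2) || (!decide ((-b.2 : Int) < -a.2) && decide (a.1 < b.1)))) =
      (fun (a b : String × Int) => decide (pvKey a < pvKey b)) := by
    funext a b
    by_cases h1 : (-a.2 : Int) < -b.2
    · have h : pvKey a < pvKey b := (pvKey_lt_iff a b).mpr (Or.inl h1)
      simp [h1, h]
    · by_cases h2 : (-b.2 : Int) < -a.2
      · have h : ¬ pvKey a < pvKey b := by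
          rw [pvKey_lt_iff]
          rintro (h | ⟨he, -⟩) <;> omega
        simp [h1, h2, h]
      · have he : (-a.2 : Int) = -b.2 := by omega
        by_cases h3 : a.1 < b.1
        · have h : pvKey a < pvKey b := (pvKey_lt_iff a b).mpr (Or.inr ⟨he, h3⟩)
          simp [h1, h2, h3, h]
        · have h : ¬ pvKey a < pvKey b := by
            rw [pvKey_lt_iff]
            rintro (h | ⟨-, hx⟩)
            · omega
            · exact h3 hx
          simp [h1, h2, h3, h]
  show xs.foldl (fun acc x => PySem.List.insertBy (fun a b =>
        (decide ((-a.2 : Int) < -b.2) || (!decide ((-b.2 : Int) < -a.2) && decide (a.1 < b.1)))) x acc) [] =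
      xs.foldl (fun acc x => PySem.List.insertBy (fun a b => decide (pvKey a < pvKey b)) x acc) []
  rw [hb]

lemma pvCharCounts_keys_nodup (word : List Char) (languages : List (String × List String)) :
    (pvCharCounts word languages).keys.Nodup := by
  unfold pvCharCounts
  have h : ∀ (w : List Char) (d : PySem.Dict String Int), d.keys.Nodup →
      (w.foldl (fun count ch =>
        ((PySem.Dict.mk languages).getD (String.ofList [ch]) (PySem.Set.add PySem.Set.empty "")).foldl
          (fun count l => count.insert l (count.getD l 0 + 1)) count) d).keys.Nodup := by
    intro w
    induction w with
    | nil => intro d h; exact h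
    | cons c t ih =>
      intro d h
      exact ih _ (PySem.Dict.nodup_keys_foldl_insert _ (fun d x => d.getD x 0 + 1) d h)
  exact h word _ PySem.Dict.nodup_keys_empty

-- A's sort-and-pick equals B's linear scan on each word's count dict
lemma pvWord_core (word : List Char) (languages : List (String × List String)) :
    (get_word_language word languages =
      (match pvWordBest word languages with | some b => b.2 | none => "")) ∧
    (∀ b, pvWordBest word languages = some b → b.2 ≠ "") := by
  have hnd : ((pvCharCounts word languages).items.map (fun p => p.1)).Nodup :=
    pvCharCounts_keys_nodup word languages
  have hperm := PySem.List.sorted_perm (pvCharCounts word languages).items pvKey false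
  have S := pvBestStep_fold_spec (pvCharCounts word languages).items none
  unfold get_word_language pvWordBest
  rw [pvSorted2_eq]
  cases hscan : (pvCharCounts word languages).items.foldl pvBestStep none with
  | none =>
    rw [hscan] at S
    obtain ⟨-, hall⟩ := S
    refine ⟨?_, by intro b hb; simp at hb⟩
    cases hL : PySem.List.sorted (pvCharCounts word languages).items pvKey with
    | nil => rfl
    | cons x rest =>
      have hx1 : x.1 = "" := hall x (hperm.subset (by rw [hL]; simp))
      cases rest with
      | nil => simpa using hx1
      | cons y t =>
        have hy1 : y.1 = "" := hall y (hperm.subset (by rw [hL]; simp))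
        simp [hx1, hy1]
  | some b =>
    rw [hscan] at S
    obtain ⟨h1, h2, -⟩ := S
    rcases h1 with h1 | ⟨p, hp, hpne, rfl⟩
    · exact absurd h1 (by simp)
    refine ⟨?_, by intro b hb; cases hb; exact hpne⟩
    cases hL : PySem.List.sorted (pvCharCounts word languages).items pvKey with
    | nil =>
      rw [(PySem.List.sorted_eq_nil_iff _ _ _).mp hL] at hp
      cases hp
    | cons x rest =>
      have hhead : ∀ q ∈ (pvCharCounts word languages).items, pvKey x ≤ pvKey q :=
        PySem.List.key_head_sorted_le _ pvKey hL
      by_cases hx1 : x.1 = ""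
      · cases rest with
        | nil =>
          have hpermx := hperm.symm
          rw [hL] at hpermx
          rw [List.perm_singleton.mp hpermx] at hp
          have : p = x := by simpa using hp
          exact absurd (this ▸ hx1) hpne
        | cons y t =>
          have hyin : y ∈ (pvCharCounts word languages).items := hperm.subset (by rw [hL]; simp)
          have hndL : ((x :: y :: t).map (fun p => p.1)).Nodup := by
            have h := (hperm.map (fun p : String × Int => p.1)).nodup_iff.mpr hnd
            rwa [hL] at h
          have hy1 : y.1 ≠ "" := by
            intro h
            simp only [List.map_cons, List.nodup_cons, List.mem_cons] at hndL
            exact hndL.1 (Or.inl (by rw [hx1, h]))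
          have hble : pvLE (-p.2, p.1) (-y.2, y.1) := h2 y hyin hy1
          have hpinL : p ∈ x :: y :: t := by
            have h := hperm.symm
            rw [hL] at h
            exact h.subset hp
          have hp2 : p ∈ y :: t := by
            rcases List.mem_cons.mp hpinL with rfl | h
            · exact absurd hx1 hpne
            · exact h
          have hyp : pvLE (-y.2, y.1) (-p.2, p.1) := by
            rcases List.mem_cons.mp hp2 with rfl | hpt
            · exact le_refl _
            · have hpw := PySem.List.sorted_pairwise (pvCharCounts word languages).items pvKey
              rw [hL] at hpw
              exact (List.pairwise_cons.mp (List.pairwise_cons.mp hpw).2).1 p hpt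
          have hbe : p.1 = y.1 := congrArg Prod.snd (pvLE_antisymm hble hyp)
          simp [hx1, hbe]
      · have hxin : x ∈ (pvCharCounts word languages).items := hperm.subset (by rw [hL]; simp)
        have hble : pvLE (-p.2, p.1) (-x.2, x.1) := h2 x hxin hx1
        have hbe : p.1 = x.1 := congrArg Prod.snd (pvLE_antisymm hble (hhead p hp))
        cases rest <;> simp [hx1, hbe]

lemma pvStep_eq (languages : List (String × List String)) (hs : PySem.Set String) (word : String) :
    pvStepA languages hs word = pvStepB languages hs word := by
  unfold pvStepA pvStepB
  obtain ⟨heq, hne⟩ := pvWord_core word.toList languages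
  rw [heq]
  cases hb : pvWordBest word.toList languages with
  | none => simp
  | some b => simp [hne b hb]

lemma pvFold_no_empty (languages : List (String × List String)) (words : List String)
    (acc : PySem.Set String) (hacc : "" ∉ acc) :
    "" ∉ words.foldl (pvStepB languages) acc := by
  induction words generalizing acc with
  | nil => exact hacc
  | cons w t ih =>
    refine ih _ ?_
    unfold pvStepB
    cases hb : pvWordBest w.toList languages with
    | none => exact hacc
    | some b =>
      rw [PySem.Set.mem_add]
      rintro (h | h)
      · exact hacc h
      · exact (pvWord_core w.toList languages).2 b hb h.symm

-- ===== VERDICT (by name: the statement is the Claim_ definition above) =====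
theorem get_request_languages_spec : Claim_equal_get_request_languages := by
  intro s languages _ _
  unfold Spec_get_request_languages get_request_languages get_request_languages_alt
  have hfold : ∀ (ws : List String) (acc : PySem.Set String),
      ws.foldl (pvStepA languages) acc = ws.foldl (pvStepB languages) acc := by
    intro ws
    induction ws with
    | nil => intro acc; rfl
    | cons w t ih => intro acc; simp only [List.foldl_cons, pvStep_eq, ih]
  rw [hfold]
  rw [if_neg]
  rintro ⟨hmem, -⟩
  exact pvFold_no_empty languages _ _ (by simp [PySem.Set.empty]) hmem
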